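-- pv_equiv track=rewrite | github.com/Arsen1302/Code-copy-detector | TestData/solutions/problem_1042_4.py | solution_1042_4
-- ===== SOURCE A (Python) =====
-- def solution_1042_4(n: int, k: int) -> str:
--     if n == 1:
--         return "0"
--     i = 1
--     s = '0'
--     while i < n:
--         z = s + '1'
--         s = s.replace('0',',').replace('1','0').replace(',','1')
--         z += s[::-1]
--         i += 1
--         s = z
--     return s[k-1]
-- ===== SOURCE B (Python) =====
-- def solution_1042_4(n: int, k: int) -> str:
--     if n <= 1:
--         return "0"
--     length = (1 << n) - 1
--     flip = False
--     while length > 1: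
--         mid = length // 2 + 1
--         if k == mid:
--             return "0" if flip else "1"
--         if k > mid:
--             k = length - k + 1
--             flip = not flip
--         length //= 2
--     return "1" if flip else "0"
-- ===== Notes on version B (the rewrite author's own statement) =====
-- stated objective: faster
-- what changed: Instead of materialising the whole 2^n-1 character fractal string and indexing it, B walks down the self-similar structure: the middle is '1', the right half is the flipped mirror of the left, so it halves the length O(n) times tracking k and a flip bit.
-- outside the precondition, e.g. on solution_1042_4(2, 0): A returns '1', B returns '0'
import Mathlib
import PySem

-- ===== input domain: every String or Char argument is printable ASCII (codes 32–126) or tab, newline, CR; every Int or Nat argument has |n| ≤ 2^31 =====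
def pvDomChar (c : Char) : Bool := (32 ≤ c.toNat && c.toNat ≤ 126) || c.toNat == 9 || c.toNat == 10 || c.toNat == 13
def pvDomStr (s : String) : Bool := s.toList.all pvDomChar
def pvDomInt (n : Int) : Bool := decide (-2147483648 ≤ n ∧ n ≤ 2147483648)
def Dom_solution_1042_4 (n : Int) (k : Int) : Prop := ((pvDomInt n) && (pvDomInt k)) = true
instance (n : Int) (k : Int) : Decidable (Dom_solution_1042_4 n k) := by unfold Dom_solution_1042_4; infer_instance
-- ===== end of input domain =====

-- B replaces A's construction of the whole 2^n-1-character string by an O(n) walk down its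
-- self-similar halves (return value only; neither program mutates its arguments).

-- ===== PORT A =====
-- s.replace('0',',').replace('1','0').replace(',','1')  (on code points)
def pvAStep (s : List Char) : List Char :=
  PySem.Chars.replace (PySem.Chars.replace (PySem.Chars.replace s ['0'] [',']) ['1'] ['0']) [','] ['1']

-- the 'while i < n' loop of A; state (i, s)
def pvALoop (i : Int) (n : Int) (s : List Char) : List Char :=
  if _h : i < n then
    -- z = s + '1';  s = s.replace…;  z += s[::-1];  i += 1;  s = z
    -- (s[::-1] ported as .reverse, exact by PySem.List.slice?_none_none_neg_one)
    pvALoop (i + 1) n ((s ++ ['1']) ++ (pvAStep s).reverse)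
  else s
termination_by (n - i).toNat
decreasing_by omega

def solution_1042_4 (n : Int) (k : Int) : String :=
  if n = 1 then "0"
  else
    match PySem.List.pyGet? (pvALoop 1 n ['0']) (k - 1) with   -- s[k-1]
    | some c => String.ofList [c]
    | none => ""                                               -- IndexError: excluded by Pre_

-- ===== PORT B =====
-- the 'while length > 1' loop of B; state (length, k, flip)
def pvBLoop (length : Int) (k : Int) (flip : Bool) : String :=
  if _h : 1 < length then
    let mid := PySem.Int.floordiv length 2 + 1
    if k = mid then (if flip then "0" else "1")
    else if mid < k then pvBLoop (PySem.Int.floordiv length 2) (length - k + 1) (!flip)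
    else pvBLoop (PySem.Int.floordiv length 2) k flip
  else (if flip then "1" else "0")
termination_by length.toNat
decreasing_by
  all_goals
    rw [PySem.Int.floordiv_eq_ediv_of_pos (by omega : (0:Int) < 2)]
    omega

def solution_1042_4_alt (n : Int) (k : Int) : String :=
  if n ≤ 1 then "0"
  else pvBLoop (2 ^ n.toNat - 1) k false

-- ===== PRECONDITION & SPEC =====
-- Pre_ excludes inputs where A raises IndexError (k outside the string) and, for n ≥ 2, the
-- non-positive k on which A's value comes from Python's accidental negative-index wraparound;
-- for n ≤ 1 A never indexes past its one-character string, so those inputs stay admitted.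
-- (k ≤ 2^n - 1 is stated via bitLength so the instance computes without building 2^n.)
def Pre_solution_1042_4 (n : Int) (k : Int) : Prop :=
  (n ≤ 0 ∧ (k = 0 ∨ k = 1)) ∨ n = 1 ∨ (2 ≤ n ∧ 1 ≤ k ∧ (PySem.Int.bitLength k : Int) ≤ n)
instance (n : Int) (k : Int) : Decidable (Pre_solution_1042_4 n k) := by
  unfold Pre_solution_1042_4; infer_instance

def pvWitness_solution_1042_4 : Int × Int := (3, 5)

def Spec_solution_1042_4 (n : Int) (k : Int) (out : String) : Prop := out = solution_1042_4_alt n k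
instance (n : Int) (k : Int) (out : String) : Decidable (Spec_solution_1042_4 n k out) := by
  unfold Spec_solution_1042_4; infer_instance

-- ===== CLAIM (what is proved, stated in full; the proofs are below) =====
def Claim_equal_solution_1042_4 : Prop := ∀ (n : Int) (k : Int), Dom_solution_1042_4 n k → Pre_solution_1042_4 n k → Spec_solution_1042_4 n k (solution_1042_4 n k)

-- ===== LEMMAS AND PROOFS =====

-- the character flip '0' ↔ '1'
def pvInv (c : Char) : Char := if c = '0' then '1' else '0'

-- semantic model of A's string: S 0 = "0", S (m+1) = S m ++ "1" ++ reverse (flip (S m))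
def pvS : Nat → List Char
  | 0 => ['0']
  | m + 1 => pvS m ++ '1' :: ((pvS m).map pvInv).reverse

lemma pvS_length (m : Nat) : (pvS m).length = 2 ^ (m + 1) - 1 := by
  induction m with
  | zero => rfl
  | succ m ih =>
    simp [pvS, ih, pow_succ]
    have : 1 ≤ 2 ^ (m + 1) := Nat.one_le_two_pow
    omega

lemma pvS_binary (m : Nat) : ∀ c ∈ pvS m, c = '0' ∨ c = '1' := by
  induction m with
  | zero => intro c hc; simp [pvS] at hc; exact Or.inl hc
  | succ m ih =>
    intro c hc
    simp [pvS] at hc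
    rcases hc with h | h | h
    · exact ih c h
    · exact Or.inr h
    · rcases h with ⟨d, _, rfl⟩
      by_cases hd : d = '0' <;> simp [pvInv, hd]

lemma replace_single_go (a b : Char) :
    ∀ (fuel : Nat) (l acc : List Char), l.length ≤ fuel →
      PySem.Chars.replace.go [a] [b] fuel l acc
        = acc.reverse ++ l.map (fun c => if c = a then b else c) := by
  intro fuel
  induction fuel with
  | zero =>
    intro l acc h
    have : l = [] := List.eq_nil_of_length_eq_zero (Nat.le_zero.mp h)
    subst this; simp [PySem.Chars.replace.go]
  | succ fuel ih =>
    intro l acc h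
    cases l with
    | nil => simp [PySem.Chars.replace.go]
    | cons c t =>
      simp only [PySem.Chars.replace.go]
      by_cases hc : c = a
      · subst hc
        rw [if_pos (by simp [List.isPrefixOf])]
        simp only [List.length_singleton, List.drop_one, List.tail_cons, List.reverse_singleton]
        rw [ih t _ (by simpa using h)]
        simp
      · rw [if_neg (by simp [List.isPrefixOf]; exact fun h' => hc h'.symm)]
        rw [ih t _ (by simpa using h)]
        simp [hc]

lemma replace_single (a b : Char) (s : List Char) :
    PySem.Chars.replace s [a] [b] = s.map (fun c => if c = a then b else c) := by
  rw [PySem.Chars.replace]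
  rw [if_neg (by simp)]
  rw [replace_single_go a b s.length s [] le_rfl]
  simp

-- on binary strings, A's three-replace chain is the character flip
lemma pvAStep_eq_map_inv (s : List Char) (hs : ∀ c ∈ s, c = '0' ∨ c = '1') :
    pvAStep s = s.map pvInv := by
  unfold pvAStep
  rw [replace_single, replace_single, replace_single]
  simp only [List.map_map]
  apply List.map_congr_left
  intro c hc
  rcases hs c hc with rfl | rfl <;> simp [pvInv]

-- one iteration of A's loop performs S m ↦ S (m+1)
lemma pvALoop_unfold (i n : Int) (m : Nat) (h : i < n) :
    pvALoop i n (pvS m) = pvALoop (i + 1) n (pvS (m + 1)) := by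
  rw [pvALoop]
  rw [dif_pos h]
  congr 1
  rw [pvAStep_eq_map_inv _ (pvS_binary m)]
  simp [pvS]

lemma pvALoop_eq_pvS (j : Nat) : ∀ (i n : Int) (m : Nat), i + j = n →
    pvALoop i n (pvS m) = pvS (m + j) := by
  induction j with
  | zero =>
    intro i n m h
    rw [pvALoop, dif_neg (by omega)]
    simp
  | succ j ih =>
    intro i n m h
    rw [pvALoop_unfold i n m (by omega)]
    rw [ih (i + 1) n (m + 1) (by omega)]
    congr 1
    omega

-- B's loop reads character k (1-based) of pvS m, flipped iff flip is set
lemma pvBLoop_eq (m : Nat) : ∀ (k : Int) (flip : Bool), 1 ≤ k → k ≤ 2 ^ (m + 1) - 1 →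
    pvBLoop (2 ^ (m + 1) - 1) k flip
      = String.ofList [if flip then pvInv ((pvS m).getD (k - 1).toNat '0')
                   else (pvS m).getD (k - 1).toNat '0'] := by
  induction m with
  | zero =>
    intro k flip hk1 hk2
    have hk : k = 1 := by norm_num at hk2; omega
    subst hk
    rw [pvBLoop, dif_neg (by norm_num)]
    cases flip <;> rfl
  | succ m ih =>
    intro k flip hk1 hk2
    have hQ : (1:Int) ≤ 2 ^ (m + 1) := one_le_pow₀ (by norm_num)
    have hQ2 : ((2:Int) ^ (m + 1 + 1) - 1) = 2 * 2 ^ (m + 1) - 1 := by ring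
    have hfd : PySem.Int.floordiv (2 ^ (m + 1 + 1) - 1) 2 = 2 ^ (m + 1) - 1 := by
      rw [PySem.Int.floordiv_eq_ediv_of_pos (by norm_num)]
      omega
    have hlen : (pvS m).length = (2 ^ (m + 1) - 1 : Nat) := pvS_length m
    have hlenI : ((pvS m).length : Int) = 2 ^ (m + 1) - 1 := by
      rw [hlen]; push_cast [Nat.one_le_two_pow]; omega
    rw [pvBLoop, dif_pos (by omega), hfd]
    by_cases hmid : k = (2 ^ (m + 1) - 1) + 1
    · -- middle character: '1'
      rw [if_pos hmid]
      have hidx : (k - 1).toNat = (pvS m).length := by omega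
      have : (pvS (m + 1)).getD (k - 1).toNat '0' = '1' := by
        rw [hidx, pvS]
        rw [List.getD_eq_getElem _ '0' (by simp)]
        simp
      rw [this]
      cases flip <;> rfl
    · rw [if_neg hmid]
      by_cases hgt : (2 ^ (m + 1) - 1 : Int) + 1 < k
      · -- right half: mirrored and flipped
        rw [if_pos hgt]
        set k' : Int := (2 ^ (m + 1 + 1) - 1) - k + 1 with hk'
        have hk'1 : 1 ≤ k' := by omega
        have hk'2 : k' ≤ 2 ^ (m + 1) - 1 := by omega
        rw [ih k' (!flip) hk'1 hk'2]
        have hidx : (k - 1).toNat = (pvS m).length + 1 + ((k - 1).toNat - ((pvS m).length + 1)) := by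
          omega
        set j : Nat := (k - 1).toNat - ((pvS m).length + 1) with hj
        have hjlt : j < (pvS m).length := by omega
        have hchar : (pvS (m + 1)).getD (k - 1).toNat '0'
            = pvInv ((pvS m).getD (k' - 1).toNat '0') := by
          rw [pvS]
          rw [List.getD_eq_getElem _ _ (by simp; omega)]
          rw [List.getElem_append_right (by omega)]
          have h1 : (k - 1).toNat - (pvS m).length = j + 1 := by omega
          simp only [h1, List.getElem_cons_succ]
          rw [List.getElem_reverse, List.getElem_map]
          rw [List.getD_eq_getElem _ _ (by omega : (k' - 1).toNat < (pvS m).length)]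
          congr 2
          simp only [List.length_map]
          omega
        rw [hchar]
        have hbin : (pvS m).getD (k' - 1).toNat '0' = '0' ∨ (pvS m).getD (k' - 1).toNat '0' = '1' := by
          rw [List.getD_eq_getElem _ _ (by omega : (k' - 1).toNat < (pvS m).length)]
          exact pvS_binary m _ (List.getElem_mem _)
        rcases hbin with hb | hb <;> rw [hb] <;> cases flip <;> simp [pvInv]
      · -- left half: same character
        rw [if_neg hgt]
        have hklt : k ≤ 2 ^ (m + 1) - 1 := by omega
        rw [ih k flip hk1 hklt]
        have hchar : (pvS (m + 1)).getD (k - 1).toNat '0' = (pvS m).getD (k - 1).toNat '0' := by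
          rw [pvS]
          rw [List.getD_eq_getElem _ _ (by simp; omega)]
          rw [List.getElem_append_left (by omega)]
          rw [List.getD_eq_getElem _ _ (by omega)]
        rw [hchar]

-- ===== VERDICT (by name: the statement is the Claim_ definition above) =====
theorem solution_1042_4_spec : Claim_equal_solution_1042_4 := by
  intro n k _hdom hpre
  unfold Spec_solution_1042_4 solution_1042_4 solution_1042_4_alt
  rcases hpre with ⟨hn, hk⟩ | hn | ⟨hn, hk1, hkb⟩
  · -- n ≤ 0: A's string is still "0"; B returns "0"
    rw [if_neg (by omega), if_pos (by omega)]
    rw [pvALoop, dif_neg (by omega)]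
    rcases hk with rfl | rfl <;> rfl
  · subst hn; rfl
  · -- main case, n ≥ 2
    rw [if_neg (by omega), if_neg (by omega)]
    set m : Nat := n.toNat - 1 with hm
    have hmn : (m : Int) + 1 = n := by omega
    have hnm : n.toNat = m + 1 := by omega
    -- A's string is pvS m
    have hA : pvALoop 1 n ['0'] = pvS m := by
      have := pvALoop_eq_pvS m 1 n 0 (by omega)
      simpa [pvS] using this
    -- bounds on k
    have hkpow : k ≤ 2 ^ (m + 1) - 1 := by
      have h1 : k.natAbs < 2 ^ PySem.Int.bitLength k := PySem.Int.lt_two_pow_bitLength k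
      have h2 : (2:Nat) ^ PySem.Int.bitLength k ≤ 2 ^ (m + 1) := by
        apply Nat.pow_le_pow_right (by norm_num)
        omega
      have h3 : k.natAbs < 2 ^ (m + 1) := lt_of_lt_of_le h1 h2
      have h4 : ((2:Nat) ^ (m + 1) : Int) = (2:Int) ^ (m + 1) := by push_cast; ring
      omega
    have hlen : (pvS m).length = (2 ^ (m + 1) - 1 : Nat) := pvS_length m
    have hlenI : ((pvS m).length : Int) = 2 ^ (m + 1) - 1 := by
      rw [hlen]; push_cast [Nat.one_le_two_pow]; omega
    have hQ : (1:Int) ≤ 2 ^ (m + 1) := one_le_pow₀ (by norm_num)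
    -- A's indexing
    have hget : PySem.List.pyGet? (pvS m) (k - 1) = some ((pvS m).getD (k - 1).toNat '0') := by
      rw [PySem.List.pyGet?_eq_some_getElem _ (by omega) (by rw [hlenI]; omega)]
      rw [List.getD_eq_getElem _ _ (by omega)]
    rw [hA, hget]
    -- B's walk
    have hpow : ((2:Int) ^ n.toNat - 1) = 2 ^ (m + 1) - 1 := by rw [hnm]
    rw [hpow, pvBLoop_eq m k false hk1 hkpow]
    simp
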